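-- pv_equiv track=rewrite | github.com/linhdvu14/cp-sols | sols/CodeForces/1610_g/B_Kalindrome_Array.py | solve
-- ===== SOURCE A (Python) =====
-- def solve(N, nums):
-- 	def is_palin(rm):
-- 		i, j = 0, N-1
-- 		while i < j:
-- 			if nums[i] == rm:
-- 				i += 1
-- 			elif nums[j] == rm:
-- 				j -= 1
-- 			elif nums[i] == nums[j]:
-- 				i += 1
-- 				j -= 1
-- 			else:
-- 				return False
-- 		return True
--
-- 	i, j = 0, N-1
-- 	while i < j:
-- 		if nums[i] == nums[j]:
-- 			i += 1
-- 			j -= 1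
-- 		else:
-- 			return is_palin(nums[i]) or is_palin(nums[j])
--
-- 	return True
-- ===== SOURCE B (Python) =====
-- def solve(N, nums):
--     xs = nums[:N] if N > 0 else []
--     n = len(xs)
--     i = 0
--     while i < n - 1 - i and xs[i] == xs[n - 1 - i]:
--         i += 1
--     if i >= n - 1 - i:
--         return True
--
--     def ok(rm):
--         f = [x for x in xs if x != rm]
--         return f == f[::-1]
--
--     return ok(xs[i]) or ok(xs[n - 1 - i])
-- ===== Notes on version B (the rewrite author's own statement) =====
-- stated objective: simpler
-- what changed: The skip-based two-pointer palindrome-after-removal helper is replaced by materializing the filtered list (all elements != rm) and comparing it with its reverse; the outer mismatch search stays a single scan over the truncated prefix.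
import Mathlib
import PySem

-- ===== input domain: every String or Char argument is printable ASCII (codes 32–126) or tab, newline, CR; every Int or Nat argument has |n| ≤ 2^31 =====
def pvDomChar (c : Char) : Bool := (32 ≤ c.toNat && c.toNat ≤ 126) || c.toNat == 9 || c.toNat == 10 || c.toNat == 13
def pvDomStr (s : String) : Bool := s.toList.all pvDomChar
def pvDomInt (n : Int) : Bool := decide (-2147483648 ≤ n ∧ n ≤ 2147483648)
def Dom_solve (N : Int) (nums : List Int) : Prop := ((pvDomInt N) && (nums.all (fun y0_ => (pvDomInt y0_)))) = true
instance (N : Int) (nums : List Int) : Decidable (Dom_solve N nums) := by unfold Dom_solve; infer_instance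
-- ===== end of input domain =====

-- B replaces A's skip-based two-pointer "palindrome after removing rm" helper by
-- filtering rm out of the prefix and comparing the filtered list with its reverse (objective: simpler).

-- ===== PORT A =====
-- A's inner helper is_palin(rm): two pointers over nums, skipping occurrences of rm.
-- The Nat fuel only makes the while-loop total (fuel ≥ j - i at every call, so it never runs out);
-- pyGet? = none is Python's IndexError, excluded by Pre_solve (the branch value false is never reached there).
def isPalinAGo (nums : List Int) (rm : Int) : Nat → Int → Int → Bool
  | 0, _, _ => true
  | fuel + 1, i, j =>
    if i < j then
      match PySem.List.pyGet? nums i, PySem.List.pyGet? nums j with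
      | some vi, some vj =>
        if vi = rm then isPalinAGo nums rm fuel (i + 1) j
        else if vj = rm then isPalinAGo nums rm fuel i (j - 1)
        else if vi = vj then isPalinAGo nums rm fuel (i + 1) (j - 1)
        else false
      | _, _ => false
    else true

-- A's outer while loop (same fuel discipline).
def solveLoopAGo (N : Int) (nums : List Int) : Nat → Int → Int → Bool
  | 0, _, _ => true
  | fuel + 1, i, j =>
    if i < j then
      match PySem.List.pyGet? nums i, PySem.List.pyGet? nums j with
      | some vi, some vj =>
        if vi = vj then solveLoopAGo N nums fuel (i + 1) (j - 1)
        else isPalinAGo nums vi (N - 1).toNat 0 (N - 1) || isPalinAGo nums vj (N - 1).toNat 0 (N - 1)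
      | _, _ => false
    else true

def solve (N : Int) (nums : List Int) : Bool := solveLoopAGo N nums (N - 1).toNat 0 (N - 1)

-- ===== PORT B =====
-- ok(rm): filter rm out of xs and compare with the reverse.
def okB (xs : List Int) (rm : Int) : Bool :=
  decide (xs.filter (fun x => x ≠ rm) = (xs.filter (fun x => x ≠ rm)).reverse)

-- B's while loop searching the first mismatching symmetric pair of xs
-- (fuel = xs.length at the call makes the loop total; it never runs out).
def loopBGo (xs : List Int) : Nat → Nat → Bool
  | 0, _ => true
  | fuel + 1, i =>
    if i < xs.length - 1 - i then
      if xs.getD i 0 = xs.getD (xs.length - 1 - i) 0 then loopBGo xs fuel (i + 1)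
      else okB xs (xs.getD i 0) || okB xs (xs.getD (xs.length - 1 - i) 0)
    else true

def solve_alt (N : Int) (nums : List Int) : Bool :=
  let xs := if 0 < N then PySem.List.slice nums none (some N) else []
  loopBGo xs xs.length 0

-- ===== PRECONDITION & SPEC =====
-- A raises IndexError (indexing nums[N-1]) exactly when N ≥ 2 and N > len(nums); it returns on all inputs below.
def Pre_solve (N : Int) (nums : List Int) : Prop := N ≤ nums.length ∨ N ≤ 1
instance (N : Int) (nums : List Int) : Decidable (Pre_solve N nums) := by unfold Pre_solve; infer_instance
def pvWitness_solve : Int × List Int := (3, [1, 2, 1])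

def Spec_solve (N : Int) (nums : List Int) (out : Bool) : Prop := out = solve_alt N nums
instance (N : Int) (nums : List Int) (out : Bool) : Decidable (Spec_solve N nums out) := by unfold Spec_solve; infer_instance

-- ===== CLAIM (what is proved, stated in full; the proofs are below) =====
def Claim_equal_solve : Prop := ∀ (N : Int) (nums : List Int), Dom_solve N nums → Pre_solve N nums → Spec_solve N nums (solve N nums)

-- ===== LEMMAS AND PROOFS =====

-- List-level version of A's skipping two-pointer palindrome test.
def skipPal (rm : Int) (l : List Int) : Bool :=
  if _h : 2 ≤ l.length then
    if l.headI = rm then skipPal rm l.tail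
    else if l.getLastD 0 = rm then skipPal rm l.dropLast
    else if l.headI = l.getLastD 0 then skipPal rm l.tail.dropLast
    else false
  else true
termination_by l.length
decreasing_by
  · simp [List.length_tail]; omega
  · simp [List.length_dropLast]; omega
  · simp [List.length_tail, List.length_dropLast]; omega

lemma skipPal_short (rm : Int) (l : List Int) (h : l.length ≤ 1) : skipPal rm l = true := by
  rw [skipPal, dif_neg (by omega)]

lemma reverse_eq_self_of_len_le_one (l : List Int) (h : l.length ≤ 1) : l.reverse = l := by
  match l with
  | [] => rfl
  | [a] => rfl
  | a :: b :: t => simp at h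

lemma pal_sandwich (a b : Int) (m : List Int) :
    ((a :: (m ++ [b])) = (a :: (m ++ [b])).reverse) ↔ (a = b ∧ m = m.reverse) := by
  have hrev : (a :: (m ++ [b])).reverse = b :: (m.reverse ++ [a]) := by simp
  rw [hrev, List.cons_eq_cons]
  constructor
  · rintro ⟨rfl, h2⟩
    exact ⟨rfl, List.append_cancel_right h2⟩
  · rintro ⟨rfl, hm⟩
    exact ⟨rfl, by rw [← hm]⟩

lemma skipPal_eq_filter (rm : Int) (l : List Int) :
    skipPal rm l = decide (l.filter (fun x => x ≠ rm) = (l.filter (fun x => x ≠ rm)).reverse) := by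
  generalize hn : l.length = n
  induction n using Nat.strong_induction_on generalizing l with
  | _ n ih =>
  by_cases h2 : 2 ≤ l.length
  · obtain ⟨a, t, rfl⟩ : ∃ a t, l = a :: t := by
      cases l with
      | nil => simp at h2
      | cons a t => exact ⟨a, t, rfl⟩
    have ht : t ≠ [] := by intro h; subst h; simp at h2
    obtain ⟨m, b, rfl⟩ : ∃ m b, t = m ++ [b] :=
      ⟨t.dropLast, t.getLast ht, (List.dropLast_append_getLast ht).symm⟩
    have hhead : (a :: (m ++ [b])).headI = a := rfl
    have hlast : (a :: (m ++ [b])).getLastD 0 = b := by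
      rw [show a :: (m ++ [b]) = (a :: m) ++ [b] from rfl, List.getLastD_concat]
    have htail : (a :: (m ++ [b])).tail = m ++ [b] := rfl
    have hdrop : (a :: (m ++ [b])).dropLast = a :: m := by
      rw [show a :: (m ++ [b]) = (a :: m) ++ [b] from rfl, List.dropLast_concat]
    have htd : (m ++ [b]).dropLast = m := List.dropLast_concat
    rw [skipPal, dif_pos h2]
    rw [hhead, hlast, htail, htd, hdrop]
    by_cases ha : a = rm
    · rw [if_pos ha]
      rw [ih (m ++ [b]).length (by simp at hn ⊢; omega) _ rfl]
      congr 1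
      simp [List.filter_cons, ha]
    · rw [if_neg ha]
      by_cases hb : b = rm
      · rw [if_pos hb]
        rw [ih (a :: m).length (by simp at hn ⊢; omega) _ rfl]
        congr 1
        simp [List.filter_cons, List.filter_append, ha, hb]
      · rw [if_neg hb]
        have hfil : (a :: (m ++ [b])).filter (fun x => x ≠ rm)
            = a :: (m.filter (fun x => x ≠ rm) ++ [b]) := by
          simp [List.filter_cons, List.filter_append, ha, hb]
        by_cases hab : a = b
        · rw [if_pos hab]
          rw [ih m.length (by simp at hn ⊢; omega) _ rfl, hfil, decide_eq_decide]
          subst hab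
          exact ⟨fun hp => (pal_sandwich a a _).mpr ⟨rfl, hp⟩,
                 fun hp => ((pal_sandwich a a _).mp hp).2⟩
        · rw [if_neg hab, hfil]
          have hnp : ¬ ((a :: (m.filter (fun x => x ≠ rm) ++ [b]))
              = (a :: (m.filter (fun x => x ≠ rm) ++ [b])).reverse) := by
            intro hcontra
            exact hab ((pal_sandwich a b _).mp hcontra).1
          exact (decide_eq_false hnp).symm
  · rw [skipPal, dif_neg h2]
    have : (l.filter (fun x => x ≠ rm)).length ≤ 1 :=
      le_trans (List.length_filter_le _ _) (by omega)
    rw [reverse_eq_self_of_len_le_one _ this]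
    simp

-- Facts about the segment (nums.drop a).take K that A's pointers walk over.
lemma take_drop_cons (nums : List Int) (a K : Nat) (ha : a < nums.length) :
    (nums.drop a).take (K + 1) = nums[a] :: ((nums.drop (a + 1)).take K) := by
  rw [List.drop_eq_getElem_cons ha, List.take_succ_cons]

lemma length_take_drop (nums : List Int) (a K : Nat) (h : a + K ≤ nums.length) :
    ((nums.drop a).take K).length = K := by
  simp; omega

lemma getLastD_take_drop (nums : List Int) (a K : Nat) (hK : 0 < K) (h : a + K ≤ nums.length) :
    ((nums.drop a).take K).getLastD 0 = nums[a + (K - 1)]'(by omega) := by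
  rw [List.getLastD_eq_getLast?, List.getLast?_eq_getElem?, length_take_drop nums a K h,
    List.getElem?_take_of_lt (by omega), List.getElem?_drop,
    List.getElem?_eq_getElem (by omega)]
  rfl

lemma dropLast_take_drop (nums : List Int) (a K : Nat) (h : a + K ≤ nums.length) :
    ((nums.drop a).take K).dropLast = (nums.drop a).take (K - 1) := by
  rw [List.dropLast_eq_take, length_take_drop nums a K h, List.take_take]
  congr 1
  omega

lemma isPalinAGo_eq_skipPal (nums : List Int) (rm : Int) :
    ∀ (fuel : Nat) (i j : Int), (j - i).toNat ≤ fuel → 0 ≤ i → j < nums.length →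
      isPalinAGo nums rm fuel i j = skipPal rm ((nums.drop i.toNat).take ((j + 1 - i).toNat)) := by
  intro fuel
  induction fuel with
  | zero =>
    intro i j hf h0 hj
    have h1 : ((nums.drop i.toNat).take ((j + 1 - i).toNat)).length ≤ 1 := by
      rw [List.length_take]; omega
    rw [isPalinAGo, skipPal_short rm _ h1]
  | succ fuel ih =>
    intro i j hf h0 hj
    by_cases h : i < j
    · have ha : i.toNat < nums.length := by omega
      have hK : (j + 1 - i).toNat = (j - i).toNat + 1 := by omega
      have hfit : i.toNat + (j + 1 - i).toNat ≤ nums.length := by omega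
      have hcons : (nums.drop i.toNat).take ((j + 1 - i).toNat)
          = nums[i.toNat] :: ((nums.drop (i.toNat + 1)).take ((j - i).toNat)) := by
        rw [hK]; exact take_drop_cons nums i.toNat ((j - i).toNat) ha
      have hlen2 : 2 ≤ ((nums.drop i.toNat).take ((j + 1 - i).toNat)).length := by
        rw [length_take_drop nums _ _ hfit]; omega
      have hhead : ((nums.drop i.toNat).take ((j + 1 - i).toNat)).headI = nums[i.toNat] := by
        rw [hcons]; rfl
      have hlast : ((nums.drop i.toNat).take ((j + 1 - i).toNat)).getLastD 0 = nums[j.toNat]'(by omega) := by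
        rw [getLastD_take_drop nums _ _ (by omega) hfit]
        congr 1
        omega
      have htail : ((nums.drop i.toNat).take ((j + 1 - i).toNat)).tail
          = (nums.drop ((i + 1).toNat)).take ((j + 1 - (i + 1)).toNat) := by
        have e1 : ((i : Int) + 1).toNat = i.toNat + 1 := by omega
        have e2 : (j + 1 - ((i : Int) + 1)).toNat = (j - i).toNat := by omega
        rw [hcons, List.tail_cons, e1, e2]
      have hdropLast : ((nums.drop i.toNat).take ((j + 1 - i).toNat)).dropLast
          = (nums.drop i.toNat).take ((j - 1 + 1 - i).toNat) := by
        rw [dropLast_take_drop nums _ _ hfit]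
        congr 1
        omega
      have htailDrop : ((nums.drop i.toNat).take ((j + 1 - i).toNat)).tail.dropLast
          = (nums.drop ((i + 1).toNat)).take ((j - 1 + 1 - (i + 1)).toNat) := by
        rw [htail, dropLast_take_drop nums _ _ (by omega)]
        congr 1
        omega
      have hgi : PySem.List.pyGet? nums i = some (nums[i.toNat]'(by omega)) :=
        PySem.List.pyGet?_eq_some_getElem nums (by omega) (by omega)
      have hgj : PySem.List.pyGet? nums j = some (nums[j.toNat]'(by omega)) :=
        PySem.List.pyGet?_eq_some_getElem nums (by omega) (by omega)
      rw [isPalinAGo, if_pos h, skipPal, dif_pos hlen2, hhead, hlast]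
      simp only [hgi, hgj]
      by_cases h1 : nums[i.toNat] = rm
      · rw [if_pos h1, if_pos h1, htail,
          ih (i + 1) j (by omega) (by omega) hj]
      · rw [if_neg h1, if_neg h1]
        by_cases h2 : nums[j.toNat]'(by omega) = rm
        · rw [if_pos h2, if_pos h2, hdropLast,
            ih i (j - 1) (by omega) h0 (by omega)]
        · rw [if_neg h2, if_neg h2]
          by_cases h3 : nums[i.toNat] = nums[j.toNat]'(by omega)
          · rw [if_pos h3, if_pos h3, htailDrop,
              ih (i + 1) (j - 1) (by omega) (by omega) (by omega)]
          · rw [if_neg h3, if_neg h3]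
    · have h1 : ((nums.drop i.toNat).take ((j + 1 - i).toNat)).length ≤ 1 := by
        rw [List.length_take]; omega
      rw [isPalinAGo, if_neg h, skipPal_short rm _ h1]

lemma isPalinA_eq_okB (nums : List Int) (rm : Int) (N : Int)
    (h1 : 1 ≤ N) (h2 : N ≤ nums.length) :
    isPalinAGo nums rm (N - 1).toNat 0 (N - 1) = okB (nums.take N.toNat) rm := by
  rw [isPalinAGo_eq_skipPal nums rm (N - 1).toNat 0 (N - 1) (by omega) le_rfl (by omega),
    skipPal_eq_filter]
  simp only [Int.toNat_zero, List.drop_zero]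
  have : (N - 1 + 1 - 0).toNat = N.toNat := by omega
  rw [this]
  rfl

lemma take_getD (nums : List Int) (k m : Nat) (h : k < m) (hm : m ≤ nums.length) :
    (nums.take m).getD k 0 = nums[k]'(by omega) := by
  rw [List.getD_eq_getElem _ _ (by simp; omega)]
  simp [List.getElem_take]

lemma loopBGo_done (xs : List Int) (fuel i : Nat) (h : ¬ i < xs.length - 1 - i) :
    loopBGo xs fuel i = true := by
  cases fuel with
  | zero => rfl
  | succ fuel => rw [loopBGo, if_neg h]

lemma loop_eq (N : Int) (nums : List Int) (hN : 2 ≤ N) (hlen : N ≤ nums.length) :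
    ∀ (f1 : Nat) (i f2 : Nat), (N - 1 - 2 * (i : Int)).toNat ≤ f1 → N.toNat - 2 * i ≤ f2 →
      solveLoopAGo N nums f1 (i : Int) (N - 1 - i) = loopBGo (nums.take N.toNat) f2 i := by
  intro f1
  induction f1 with
  | zero =>
    intro i f2 hf1 hf2
    have hxl : (nums.take N.toNat).length = N.toNat := by simp; omega
    rw [solveLoopAGo, loopBGo_done _ _ _ (by rw [hxl]; omega)]
  | succ f1 ih =>
    intro i f2 hf1 hf2
    have hxl : (nums.take N.toNat).length = N.toNat := by simp; omega
    by_cases h : (i : Int) < N - 1 - i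
    · cases f2 with
      | zero => omega
      | succ f2 =>
        have hgi : PySem.List.pyGet? nums (i : Int) = some (nums[i]'(by omega)) := by
          rw [PySem.List.pyGet?_eq_some_getElem nums (by omega) (by omega)]
          simp
        have hjnat : (N - 1 - (i : Int)).toNat = N.toNat - 1 - i := by omega
        have hgj : PySem.List.pyGet? nums (N - 1 - (i : Int)) = some (nums[N.toNat - 1 - i]'(by omega)) := by
          rw [PySem.List.pyGet?_eq_some_getElem nums (by omega) (by omega)]
          simp only [hjnat]
        have hBc : i < (nums.take N.toNat).length - 1 - i := by rw [hxl]; omega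
        have hvi : (nums.take N.toNat).getD i 0 = nums[i]'(by omega) :=
          take_getD nums i N.toNat (by omega) (by omega)
        have hvj : (nums.take N.toNat).getD ((nums.take N.toNat).length - 1 - i) 0
            = nums[N.toNat - 1 - i]'(by omega) := by
          rw [hxl]; exact take_getD nums _ N.toNat (by omega) (by omega)
        rw [solveLoopAGo, if_pos h, loopBGo, if_pos hBc, hvi, hvj]
        simp only [hgi, hgj]
        by_cases heq : nums[i]'(by omega) = nums[N.toNat - 1 - i]'(by omega)
        · rw [if_pos heq, if_pos heq]
          have harg : (N - 1 - (i : Int) - 1) = N - 1 - ((i + 1 : Nat) : Int) := by push_cast; ring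
          rw [show ((i : Int) + 1) = ((i + 1 : Nat) : Int) by push_cast; ring, harg]
          exact ih (i + 1) f2 (by omega) (by omega)
        · rw [if_neg heq, if_neg heq]
          rw [isPalinA_eq_okB nums _ N (by omega) hlen, isPalinA_eq_okB nums _ N (by omega) hlen]
    · rw [solveLoopAGo, if_neg h, loopBGo_done _ _ _ (by rw [hxl]; omega)]

lemma slice_eq_take (nums : List Int) (N : Int) (h : 0 < N) :
    PySem.List.slice nums none (some N) = nums.take N.toNat :=
  PySem.List.slice_to nums (by omega)

-- ===== VERDICT (by name: the statement is the Claim_ definition above) =====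
theorem solve_spec : Claim_equal_solve := by
  intro N nums _hd hpre
  unfold Spec_solve solve solve_alt
  by_cases hN : N ≤ 1
  · rw [show (N - 1).toNat = 0 from by omega, solveLoopAGo]
    by_cases h0 : 0 < N
    · simp only [if_pos h0, slice_eq_take nums N h0]
      rw [loopBGo_done _ _ _ (by simp; omega)]
    · simp only [if_neg h0]
      rw [loopBGo_done _ _ _ (by simp)]
  · have hlen : N ≤ nums.length := by
      rcases hpre with h | h
      · exact h
      · omega
    simp only [if_pos (show 0 < N by omega), slice_eq_take nums N (by omega)]
    have := loop_eq N nums (by omega) hlen (N - 1).toNat 0 ((nums.take N.toNat).length) (by omega)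
      (by simp; omega)
    simpa using this
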